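-- pv_equiv track=rewrite | github.com/fabiotomasellik89-netizen/ProgettoSF | tempo.py | _fmt_ready_section
-- ===== SOURCE A (Python) =====
-- from typing import Any, Dict, List, Tuple
--
-- def _fmt_ready_section(title: str, names: List[str]) -> List[str]:
--     """Formatta una sezione di elementi pronti"""
--     lines: List[str] = [f"{title}:"]
--     if not names:
--         lines.append("nulla")
--         return lines
--
--     # Raggruppa per nome (conteggio)
--     freq: Dict[str, int] = {}
--     for n in names:
--         freq[n] = freq.get(n, 0) + 1
--
--     for name in sorted(freq.keys()):
--         cnt = freq[name]
--         lines.append(f"{name}" + (f" x{cnt}" if cnt > 1 else ""))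
--
--     return lines
-- ===== SOURCE B (Python) =====
-- from typing import List
--
--
-- def _fmt_ready_section(title: str, names: List[str]) -> List[str]:
--     """Formatta una sezione di elementi pronti (selezione ripetuta del minimo:
--     niente dict delle frequenze e niente sort)."""
--     lines: List[str] = [f"{title}:"]
--     if not names:
--         lines.append("nulla")
--         return lines
--     rest = names
--     while rest:
--         m = min(rest)
--         cnt = sum(1 for x in rest if x == m)
--         lines.append(m + (f" x{cnt}" if cnt > 1 else ""))
--         rest = [x for x in rest if x != m]
--     return lines
-- ===== Notes on version B (the rewrite author's own statement) =====
-- stated objective: alternative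
-- what changed: Replaced the frequency dict + sorted(keys) pass with a selection loop: repeatedly take the minimum of the remaining names, count and emit it, and filter out all its occurrences -- no dict and no sort at all.
import Mathlib
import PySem

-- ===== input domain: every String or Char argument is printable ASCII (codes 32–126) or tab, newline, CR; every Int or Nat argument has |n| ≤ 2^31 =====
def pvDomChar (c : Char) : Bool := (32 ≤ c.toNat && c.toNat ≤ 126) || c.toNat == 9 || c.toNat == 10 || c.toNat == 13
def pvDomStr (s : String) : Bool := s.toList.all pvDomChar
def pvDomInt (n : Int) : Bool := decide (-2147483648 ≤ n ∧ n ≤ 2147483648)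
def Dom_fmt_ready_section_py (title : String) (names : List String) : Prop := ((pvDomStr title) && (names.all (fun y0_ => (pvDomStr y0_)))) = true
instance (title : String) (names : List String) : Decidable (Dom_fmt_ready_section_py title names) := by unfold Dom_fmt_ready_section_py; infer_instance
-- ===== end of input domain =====

-- B replaces A's frequency dict + sorted-keys pass with a selection loop (repeated minimum + filter), an alternative with no dict and no sort.


-- ===== PORT A =====
def fmt_ready_section_py (title : String) (names : List String) : List String :=
  let lines : List String := [title ++ ":"]
  if names = [] then
    lines ++ ["nulla"]
  else
    -- freq[n] = freq.get(n, 0) + 1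
    let freq : PySem.Dict String Int :=
      names.foldl (fun d n => d.insert n (d.getD n 0 + 1)) PySem.Dict.empty
    (PySem.List.sorted freq.keys (fun x => x) false).foldl
      (fun ls name =>
        let cnt := freq.getD name 0
        ls ++ [name ++ (if cnt > 1 then " x" ++ PySem.Int.toStr cnt else "")]) lines

-- ===== PORT B =====
-- the 'while rest:' selection loop of Source B: take the minimum, count it (the
-- 'sum(1 for x in rest if x == m)' comprehension), emit the line, filter it out
def fmtMins : List String → List String
  | [] => []
  | x :: t =>
    match hm : PySem.List.min? (x :: t) (fun s => s) with
    | none => []   -- unreachable: the list is nonempty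
    | some m =>
      let cnt : Int := ((x :: t).count m : Nat)
      (m ++ (if cnt > 1 then " x" ++ PySem.Int.toStr cnt else "")) ::
        fmtMins ((x :: t).filter (fun y => !(y == m)))
termination_by l => l.length
decreasing_by
  have hmem : m ∈ x :: t := PySem.List.min?_mem hm
  exact List.length_filter_lt_length_iff_exists.mpr ⟨m, hmem, by simp⟩

def fmt_ready_section_py_alt (title : String) (names : List String) : List String :=
  if names = [] then [title ++ ":", "nulla"]
  else (title ++ ":") :: fmtMins names

-- ===== PRECONDITION & SPEC =====
def Spec_fmt_ready_section_py (title : String) (names : List String) (out : List String) : Prop := out = fmt_ready_section_py_alt title names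
instance (title : String) (names : List String) (out : List String) : Decidable (Spec_fmt_ready_section_py title names out) := by unfold Spec_fmt_ready_section_py; infer_instance

-- ===== CLAIM (what is proved, stated in full; the proofs are below) =====
def Claim_equal_fmt_ready_section_py : Prop := ∀ (title : String) (names : List String), Dom_fmt_ready_section_py title names → Spec_fmt_ready_section_py title names (fmt_ready_section_py title names)

-- ===== LEMMAS AND PROOFS =====

-- the selection loop = the line map over the strictly sorted distinct elements,
-- each with its multiplicity in the list
theorem fmtMins_eq : ∀ (l : List String),
    fmtMins l = (PySem.List.sorted (PySem.Set.ofList l) (fun x => x) false).map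
      (fun k => k ++ (if ((l.count k : Int) > 1) then " x" ++ PySem.Int.toStr (l.count k : Int) else "")) := by
  intro l
  induction l using fmtMins.induct with
  | case1 =>
      simp [fmtMins, PySem.Set.ofList, PySem.List.sorted]
  | case2 x t hm =>
      exact absurd ((PySem.List.min?_eq_none_iff _ _).mp hm) (by simp)
  | case3 x t m hm ih =>
      have hmem : m ∈ x :: t := PySem.List.min?_mem hm
      have hmin : ∀ y ∈ x :: t, m ≤ y := by
        intro y hy; exact PySem.List.min?_isMin hm y hy
      set rest := (x :: t).filter (fun y => !(y == m)) with hrest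
      have hmem_rest : ∀ y, y ∈ rest ↔ (y ∈ x :: t ∧ y ≠ m) := by
        intro y; simp [hrest]
      have hgt : ∀ y ∈ rest, m < y := by
        intro y hy
        obtain ⟨hyl, hne⟩ := (hmem_rest y).mp hy
        exact lt_of_le_of_ne (hmin y hyl) (Ne.symm hne)
      have hmemd : ∀ a, a ∈ PySem.List.sorted (PySem.Set.ofList rest) (fun x => x) false ↔ a ∈ rest := by
        intro a; rw [PySem.List.mem_sorted, PySem.Set.mem_ofList]
      -- sorted distinct elements of the list = min :: sorted distinct of the filtered rest
      have hsorted : PySem.List.sorted (PySem.Set.ofList (x :: t)) (fun x => x) false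
          = m :: PySem.List.sorted (PySem.Set.ofList rest) (fun x => x) false := by
        apply PySem.List.sorted_eq_of_perm_of_pairwise_lt
        · apply (List.perm_ext_iff_of_nodup ?nd1 (PySem.Set.nodup_ofList _)).mpr
          case nd1 =>
            apply List.nodup_cons.mpr
            refine ⟨fun hms => absurd (hgt m ((hmemd m).mp hms)) (lt_irrefl m), ?_⟩
            exact (PySem.List.sorted_perm _ _ _).nodup_iff.mpr (PySem.Set.nodup_ofList _)
          intro a
          rw [PySem.Set.mem_ofList]
          constructor
          · intro h
            rcases List.mem_cons.mp h with rfl | hs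
            · exact hmem
            · exact ((hmem_rest a).mp ((hmemd a).mp hs)).1
          · intro hal
            by_cases ham : a = m
            · exact ham ▸ List.mem_cons_self
            · exact List.mem_cons.mpr (Or.inr ((hmemd a).mpr ((hmem_rest a).mpr ⟨hal, ham⟩)))
        · apply List.pairwise_cons.mpr
          exact ⟨fun a ha => hgt a ((hmemd a).mp ha), PySem.List.sorted_ofList_pairwise_lt _⟩
      have hcount_rest : ∀ k ∈ rest, rest.count k = (x :: t).count k := by
        intro k hk
        have hkm : k ≠ m := ((hmem_rest k).mp hk).2
        rw [hrest, List.count_filter]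
        simp [hkm]
      rw [fmtMins, hm]
      dsimp only
      rw [hsorted, List.map_cons]
      congr 1
      rw [ih]
      apply List.map_congr_left
      intro k hk
      rw [hcount_rest k ((hmemd k).mp hk)]

-- ===== VERDICT (by name: the statement is the Claim_ definition above) =====
theorem fmt_ready_section_py_spec : Claim_equal_fmt_ready_section_py := by
  intro title names _
  unfold Spec_fmt_ready_section_py fmt_ready_section_py fmt_ready_section_py_alt
  by_cases hn : names = []
  · simp [hn]
  · simp only [if_neg hn]
    have hkeys : (names.foldl (fun (d : PySem.Dict String Int) n => d.insert n (d.getD n 0 + 1)) PySem.Dict.empty).keys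
        = PySem.Set.ofList names := by
      rw [PySem.Dict.keys_foldl_insert, PySem.Dict.keys_empty, PySem.Set.update_nil_left]
    have hcnt : ∀ v, (names.foldl (fun (d : PySem.Dict String Int) n => d.insert n (d.getD n 0 + 1)) PySem.Dict.empty).getD v 0
        = (names.count v : Int) := by
      intro v
      rw [PySem.Dict.getD_foldl_insert_add_one]
      simp
    rw [hkeys, PySem.List.foldl_append_singleton_eq_map, fmtMins_eq]
    simp [hcnt]
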